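-- pv_equiv track=rewrite | github.com/markpony100/AICUP-2023-MIG | postprocess/postprocess_page.py | join_kfold_preds
-- ===== SOURCE A (Python) =====
-- def unique(input_lst):
--     elem_set = []
--     for elem in input_lst:
--         if elem not in elem_set:
--             elem_set.append(elem)
--     return elem_set
--
-- def join_kfold_preds(pred_lst):
--     buf_dic = pred_lst[0]
--     for i in range(len(pred_lst)):
--         if i ==0:
--             continue
--         for key in pred_lst[i]:
--             if key in buf_dic.keys():
--                 buf_dic[key]+=pred_lst[i][key]
--             else:
--                 buf_dic[key]=pred_lst[i][key]
--     for key in buf_dic:#post process clean duplicate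
--         buf_dic[key]=unique(buf_dic[key])
--     return buf_dic
-- ===== SOURCE B (Python) =====
-- def join_kfold_preds(pred_lst):
--     # Single pass: dedup while merging, instead of concatenating everything and
--     # rescanning every key afterwards. Mutates pred_lst[0] in place, like the original.
--     result = pred_lst[0]
--     for key in result:
--         fresh = []
--         for e in result[key]:
--             if e not in fresh:
--                 fresh.append(e)
--         result[key] = fresh
--     for dic in pred_lst[1:]:
--         for key in dic:
--             if key in result:
--                 cur = result[key]
--                 for e in dic[key]:
--                     if e not in cur:
--                         cur.append(e)
--             else:
--                 fresh = []
--                 for e in dic[key]: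
--                     if e not in fresh:
--                         fresh.append(e)
--                 result[key] = fresh
--     return result
-- ===== Notes on version B (the rewrite author's own statement) =====
-- stated objective: alternative
-- what changed: B deduplicates while merging in a single pass (per-key append of not-yet-seen elements), instead of A's concatenating all folds per key and then rescanning every key with a separate unique() pass.
import Mathlib
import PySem

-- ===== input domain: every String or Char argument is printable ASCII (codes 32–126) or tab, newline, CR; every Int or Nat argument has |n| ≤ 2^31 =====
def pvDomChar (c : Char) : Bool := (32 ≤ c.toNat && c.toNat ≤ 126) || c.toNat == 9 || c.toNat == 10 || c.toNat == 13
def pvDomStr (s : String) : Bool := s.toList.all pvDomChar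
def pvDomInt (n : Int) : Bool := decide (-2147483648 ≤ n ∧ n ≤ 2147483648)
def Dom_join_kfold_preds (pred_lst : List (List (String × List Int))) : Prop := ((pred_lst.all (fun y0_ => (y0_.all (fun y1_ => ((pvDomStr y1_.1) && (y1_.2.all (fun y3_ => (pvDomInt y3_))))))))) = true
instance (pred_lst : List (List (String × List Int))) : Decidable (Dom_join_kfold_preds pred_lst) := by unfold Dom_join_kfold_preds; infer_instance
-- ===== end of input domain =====

-- B merges and dedups in a single pass (dedup while appending) instead of A's
-- concatenate-everything-then-rescan-every-key; equivalence is about the return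
-- value — both Pythons mutate pred_lst[0] in place the same way.

-- ===== PORT A =====
def unique (input_lst : List Int) : List Int :=
  input_lst.foldl (fun elem_set elem => if elem_set.contains elem then elem_set else elem_set ++ [elem]) []

def join_kfold_preds (pred_lst : List (List (String × List Int))) : List (String × List Int) :=
  match pred_lst with
  | [] => []            -- pred_lst[0] raises IndexError here; excluded by Pre_
  | d0 :: rest =>
    -- buf_dic = pred_lst[0]; then for i in 1..: for key in pred_lst[i]: concatenate or install
    let buf : PySem.Dict String (List Int) :=
      rest.foldl (fun buf d =>
        d.foldl (fun buf kv =>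
          if buf.contains kv.1 then buf.insert kv.1 (buf.getD kv.1 [] ++ kv.2)
          else buf.insert kv.1 kv.2) buf) (PySem.Dict.mk d0)
    -- for key in buf_dic: buf_dic[key] = unique(buf_dic[key])  (reassignment keeps each key's position)
    buf.items.map (fun kv => (kv.1, unique kv.2))

-- ===== PORT B =====
def dedupAppend (cur : List Int) (xs : List Int) : List Int :=
  xs.foldl (fun cur e => if cur.contains e then cur else cur ++ [e]) cur

def join_kfold_preds_alt (pred_lst : List (List (String × List Int))) : List (String × List Int) :=
  match pred_lst with
  | [] => []            -- result = pred_lst[0] raises IndexError here; excluded by Pre_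
  | d0 :: rest =>
    -- first dedup pred_lst[0]'s own lists in place
    let result : PySem.Dict String (List Int) :=
      PySem.Dict.mk (d0.map (fun kv => (kv.1, dedupAppend [] kv.2)))
    -- then merge each later dict, appending only not-yet-seen elements
    (rest.foldl (fun res d =>
      d.foldl (fun res kv =>
        if res.contains kv.1 then res.insert kv.1 (dedupAppend (res.getD kv.1 []) kv.2)
        else res.insert kv.1 (dedupAppend [] kv.2)) res) result).items

-- ===== PRECONDITION & SPEC =====
-- Pre_ excludes only the empty list, on which A raises IndexError at pred_lst[0].
def Pre_join_kfold_preds (pred_lst : List (List (String × List Int))) : Prop := pred_lst ≠ []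
instance (pred_lst : List (List (String × List Int))) : Decidable (Pre_join_kfold_preds pred_lst) := by unfold Pre_join_kfold_preds; infer_instance
def pvWitness_join_kfold_preds : (List (List (String × List Int))) :=
  [[("a", [1, 2, 2, 1])], [("a", [2, 3]), ("b", [0])]]
def Spec_join_kfold_preds (pred_lst : List (List (String × List Int))) (out : List (String × List Int)) : Prop := out = join_kfold_preds_alt pred_lst
instance (pred_lst : List (List (String × List Int))) (out : List (String × List Int)) : Decidable (Spec_join_kfold_preds pred_lst out) := by unfold Spec_join_kfold_preds; infer_instance

-- ===== CLAIM (what is proved, stated in full; the proofs are below) =====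
def Claim_equal_join_kfold_preds : Prop := ∀ (pred_lst : List (List (String × List Int))), Dom_join_kfold_preds pred_lst → Pre_join_kfold_preds pred_lst → Spec_join_kfold_preds pred_lst (join_kfold_preds pred_lst)

-- ===== LEMMAS AND PROOFS =====

-- per-entry dedup map, and its action on a whole dict
def pvG (kv : String × List Int) : String × List Int := (kv.1, unique kv.2)
def pvY (d : PySem.Dict String (List Int)) : PySem.Dict String (List Int) :=
  PySem.Dict.mk (d.items.map pvG)

theorem unique_append (v vs : List Int) : dedupAppend (unique v) vs = unique (v ++ vs) := by
  simp [unique, dedupAppend, List.foldl_append]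

theorem dict_eta (d : PySem.Dict String (List Int)) : PySem.Dict.mk d.items = d := rfl

theorem get?_pvY (d : PySem.Dict String (List Int)) (k : String) :
    (pvY d).get? k = (d.get? k).map unique := by
  rw [← dict_eta d]
  show (PySem.Dict.mk (d.items.map pvG)).get? k = ((PySem.Dict.mk d.items).get? k).map unique
  induction d.items with
  | nil => rfl
  | cons a l ih =>
    obtain ⟨a1, a2⟩ := a
    simp only [List.map, pvG, PySem.Dict.get?_mk_cons]
    by_cases h : a1 == k
    · simp [h]
    · simp only [h, Bool.false_eq_true, ite_false]
      exact ih

theorem contains_pvY (d : PySem.Dict String (List Int)) (k : String) :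
    (pvY d).contains k = d.contains k := by
  rw [PySem.Dict.contains_eq_isSome_get?, PySem.Dict.contains_eq_isSome_get?, get?_pvY]
  cases d.get? k <;> rfl

theorem getD_pvY (d : PySem.Dict String (List Int)) (k : String) :
    (pvY d).getD k [] = unique (d.getD k []) := by
  rw [PySem.Dict.getD_eq_get?_getD, PySem.Dict.getD_eq_get?_getD, get?_pvY]
  cases d.get? k <;> rfl

theorem insert_pvY (d : PySem.Dict String (List Int)) (k : String) (w : List Int) :
    (pvY d).insert k (unique w) = pvY (d.insert k w) := by
  apply PySem.Dict.ext
  show ((pvY d).insert k (unique w)).items = (PySem.Dict.mk ((d.insert k w).items.map pvG)).items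
  rw [PySem.Dict.items_insert, PySem.Dict.items_insert, contains_pvY]
  by_cases h : d.contains k
  · simp only [h, if_true]
    show (d.items.map pvG).map (fun p => if p.1 == k then (k, unique w) else p)
        = (d.items.map (fun p => if p.1 == k then (k, w) else p)).map pvG
    rw [List.map_map, List.map_map]
    apply List.map_congr_left
    intro p _
    by_cases hp : p.1 == k
    · simp [Function.comp, pvG, hp]
    · simp [Function.comp, pvG, hp]
  · simp only [h, if_false, Bool.false_eq_true]
    show d.items.map pvG ++ [(k, unique w)] = (d.items ++ [(k, w)]).map pvG
    simp [pvG]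

theorem step_pvY (buf : PySem.Dict String (List Int)) (kv : String × List Int) :
    (if (pvY buf).contains kv.1 then
        (pvY buf).insert kv.1 (dedupAppend ((pvY buf).getD kv.1 []) kv.2)
      else (pvY buf).insert kv.1 (dedupAppend [] kv.2))
    = pvY (if buf.contains kv.1 then buf.insert kv.1 (buf.getD kv.1 [] ++ kv.2)
           else buf.insert kv.1 kv.2) := by
  rw [contains_pvY, getD_pvY]
  by_cases h : buf.contains kv.1
  · simp only [h, if_true]
    rw [unique_append, insert_pvY]
  · simp only [h, if_false, Bool.false_eq_true]
    show (pvY buf).insert kv.1 (unique kv.2) = _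
    rw [insert_pvY]

theorem inner_pvY (d : List (String × List Int)) (buf : PySem.Dict String (List Int)) :
    d.foldl (fun res kv =>
        if res.contains kv.1 then res.insert kv.1 (dedupAppend (res.getD kv.1 []) kv.2)
        else res.insert kv.1 (dedupAppend [] kv.2)) (pvY buf)
    = pvY (d.foldl (fun buf kv =>
        if buf.contains kv.1 then buf.insert kv.1 (buf.getD kv.1 [] ++ kv.2)
        else buf.insert kv.1 kv.2) buf) := by
  induction d generalizing buf with
  | nil => rfl
  | cons kv d ih =>
    simp only [List.foldl_cons]
    rw [step_pvY, ih]

theorem outer_pvY (rest : List (List (String × List Int))) (buf : PySem.Dict String (List Int)) :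
    rest.foldl (fun res d =>
      d.foldl (fun res kv =>
        if res.contains kv.1 then res.insert kv.1 (dedupAppend (res.getD kv.1 []) kv.2)
        else res.insert kv.1 (dedupAppend [] kv.2)) res) (pvY buf)
    = pvY (rest.foldl (fun buf d =>
      d.foldl (fun buf kv =>
        if buf.contains kv.1 then buf.insert kv.1 (buf.getD kv.1 [] ++ kv.2)
        else buf.insert kv.1 kv.2) buf) buf) := by
  induction rest generalizing buf with
  | nil => rfl
  | cons d rest ih =>
    simp only [List.foldl_cons]
    rw [inner_pvY, ih]

-- ===== VERDICT (by name: the statement is the Claim_ definition above) =====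
theorem join_kfold_preds_spec : Claim_equal_join_kfold_preds := by
  intro pred_lst _ hpre
  unfold Spec_join_kfold_preds
  match pred_lst, hpre with
  | d0 :: rest, _ =>
    show ((rest.foldl (fun buf d =>
            d.foldl (fun buf kv =>
              if buf.contains kv.1 then buf.insert kv.1 (buf.getD kv.1 [] ++ kv.2)
              else buf.insert kv.1 kv.2) buf) (PySem.Dict.mk d0)).items).map pvG
        = (rest.foldl (fun res d =>
            d.foldl (fun res kv =>
              if res.contains kv.1 then res.insert kv.1 (dedupAppend (res.getD kv.1 []) kv.2)
              else res.insert kv.1 (dedupAppend [] kv.2)) res) (pvY (PySem.Dict.mk d0))).items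
    rw [outer_pvY]
    rfl
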